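/-
  CALL AND RETURN around a walk (the vocabulary is UserX/Contract.lean's: `Conv`, `Spec`, `AtEntry`, `Returned`, `Calls`).

      u_entry he                opens `he : AtEntry K entry frame ret u` at the top of a function's proof into the hypotheses a
                                walk reads: `he_rip`, `he_retAddr`, `he_ret_lt`, `he_align`, `he_room`, `he_top`, `he_code`, `he_inv`
      u_returned                at the state after the function's `ret`: the goal `Returned K s u ret v` from the walker's
                                hypotheses — `rip`, `rsp`, the callee-saved registers (`u_saved`), the footprint (`u_same`);
                                `code`, `inv`, `post` and whatever does not close are left, named after the field
      u_targets [e₁, e₂, …] h   an INDIRECT call or jump: the walk stopped with RIP not a literal; `h : v.rip = x` (the walker's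
                                `w_rip`) and the target `x` is one of the entries — one goal `x ∈ [e₁, …]`, then one goal per
                                entry with `hrip : v.rip = eᵢ`, where `u_walk` goes on (and applies the contract of `eᵢ`)

  A call to a function with a contract `Calls L μ I K entry s` in the context is applied by `u_walk` itself (`walkCall`): the
  goals `call_align`, `call_room`, `call_top`, `call_code`, `call_inv`, `pre_<addr>` come first, and the walk stops after the
  return with `w_same`, `w_code`, `w_inv`, `w_post`; the function's own code at the returned state comes from `w_code` (the
  image's code) by the lemma of the function's slot.
-/
import UserX.Walk
import UserX.FrameTac

open Lean Meta Elab Tactic in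
/-- `u_entry he`: the fields of an `AtEntry` hypothesis as hypotheses `he_rip` … (= `u_open he`). -/
macro "u_entry " h:term:max : tactic => `(tactic| u_open $h)

open Lean Meta Elab Tactic in
/-- Rewrite the goal `v.reg .rsp = u.reg .rsp + 8` with the facts of the context about the two registers, then close it by
the address normal form. -/
elab "u_rsp_popped" : tactic => withMainContext do
  let g ← getMainGoal
  let ty := (← instantiateMVars (← g.getType)).cleanupAnnotations
  unless ty.isAppOfArity ``Eq 3 do
    throwError "u_rsp_popped: not an equation"
  for d in ← getLCtx do
    if d.isImplementationDetail then continue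
    let t := (← instantiateMVars d.type).cleanupAnnotations
    if t.isAppOfArity ``Eq 3 then
      let lhs := (t.getArg! 1).consumeMData
      if lhs.isAppOfArity ``X86.User.State.reg 2 && (lhs.getArg! 1).isConstOf ``X86.Reg.rsp then
        let h ← Term.exprToSyntax d.toExpr
        evalTactic (← `(tactic| try rw [$h:term]))
  evalTactic (← `(tactic| first
    | (with_reducible rfl)
    | (simp only [Word.addrNorm, Word.addrNormSub, UInt64.add_zero])))

/-- `u_returned`: see the file header. -/
macro "u_returned" : tactic => `(tactic| (
  refine X86.User.Returned.mk ?rip ?rsp ?saved ?same ?code ?inv ?post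
  case rip => first | (with_reducible assumption) | skip
  case rsp => first | (with_reducible assumption) | u_rsp_popped | skip
  case saved => first | u_saved | skip
  case same => first | (unfold X86.User.Spec.footprint; u_same) | skip
  case code => first | (with_reducible assumption) | skip
  case inv => first | (with_reducible assumption) | skip
  case post => skip))

/-- `u_targets [e₁, e₂, …] h`: see the file header. The goals: `x ∈ [e₁, …]` first (after `rw [h]`: about the value of the
target register), then one per entry with `hrip : v.rip = eᵢ` in the context. -/
syntax "u_targets " "[" term,* "] " term:max : tactic

open Lean Meta Elab Tactic in
elab_rules : tactic
  | `(tactic| u_targets [$es,*] $h) => do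
    evalTactic (← `(tactic| refine X86.User.ReachVia.of_targets [$es,*] ?_ ?_))
    let gs ← getUnsolvedGoals
    let memGoal :: eachGoal :: rest := gs | throwError "u_targets: expected two goals"
    -- the membership: stated of the value of RIP
    setGoals [memGoal]
    evalTactic (← `(tactic| try rw [$h:term]))
    let memLeft ← getUnsolvedGoals
    -- one goal per entry
    let (_, g) ← eachGoal.introN 3 [`u_t, `u_ht, `hrip]
    setGoals [g]
    let ht := mkIdent `u_ht
    evalTactic (← `(tactic| simp only [List.mem_cons, List.mem_nil_iff, or_false] at $ht:ident))
    -- split the disjunction `t = e₁ ∨ t = e₂ ∨ …`, substituting in each case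
    let mut todo : List MVarId := ← getUnsolvedGoals
    let mut done : List MVarId := []
    while !todo.isEmpty do
      let cur := todo.head!
      todo := todo.tail!
      let next ← cur.withContext do
        let some d := (← getLCtx).findFromUserName? `u_ht | pure ([], [cur])
        let ty ← whnfR (← instantiateMVars d.type)
        if ty.isAppOfArity ``Or 2 then
          let subgoals ← cur.cases d.fvarId #[{ varNames := [`u_ht] }, { varNames := [`u_ht] }]
          pure (subgoals.toList.map (·.mvarId), [])
        else if ty.isAppOfArity ``Eq 3 then
          let (_, g') ← substCore cur d.fvarId (symm := false) (tryToSkip := true)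
          pure ([], [g'])
        else
          pure ([], [cur])
      todo := next.1 ++ todo
      done := done ++ next.2
    setGoals done
    let eachLeft ← getUnsolvedGoals
    setGoals (memLeft ++ eachLeft ++ rest)
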